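-- pv_equiv track=rewrite | github.com/singe/domain-probe | domain_probe.py | expand_question_marks
-- ===== SOURCE A (Python) =====
-- import itertools
-- from typing import Iterable, Iterator, Sequence
--
-- def expand_question_marks(pattern: str, wildcard_tokens: Sequence[str]) -> Iterator[str]:
--     positions = [idx for idx, char in enumerate(pattern) if char == "?"]
--     if not positions:
--         yield pattern
--         return
--
--     for combo in itertools.product(wildcard_tokens, repeat=len(positions)):
--         parts: list[str] = []
--         prev = 0
--         for pos, replacement in zip(positions, combo):
--             parts.append(pattern[prev:pos])
--             parts.append(replacement)
--             prev = pos + 1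
--         parts.append(pattern[prev:])
--         yield "".join(parts)
-- ===== SOURCE B (Python) =====
-- def expand_question_marks(pattern, wildcard_tokens):
--     i = pattern.find("?")
--     if i == -1:
--         yield pattern
--         return
--     head = pattern[:i]
--     rest = pattern[i + 1:]
--     for token in wildcard_tokens:
--         for tail in expand_question_marks(rest, wildcard_tokens):
--             yield head + token + tail
-- ===== Notes on version B (the rewrite author's own statement) =====
-- stated objective: alternative
-- what changed: Replaces the positions list + itertools.product + per-combination re-slicing with a direct recursion on the pattern: split at the first '?', loop over tokens outermost and recursively expand the suffix, concatenating prefix+token+tail.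
import Mathlib
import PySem

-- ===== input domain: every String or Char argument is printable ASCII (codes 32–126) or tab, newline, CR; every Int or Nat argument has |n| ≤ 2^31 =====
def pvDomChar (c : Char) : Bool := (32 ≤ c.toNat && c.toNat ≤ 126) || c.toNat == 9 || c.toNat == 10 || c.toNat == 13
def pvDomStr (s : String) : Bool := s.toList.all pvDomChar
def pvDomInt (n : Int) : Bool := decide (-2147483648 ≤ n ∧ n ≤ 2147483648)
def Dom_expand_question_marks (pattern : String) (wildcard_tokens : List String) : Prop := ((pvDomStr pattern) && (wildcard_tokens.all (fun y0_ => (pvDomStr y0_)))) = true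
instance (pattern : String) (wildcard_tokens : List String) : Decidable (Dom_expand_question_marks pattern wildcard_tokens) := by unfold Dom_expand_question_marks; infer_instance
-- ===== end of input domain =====

-- B replaces the positions list + itertools.product + per-combination re-slicing with a
-- recursion on the pattern: split at the first '?', loop over tokens (outermost, so the
-- order matches product's leftmost-slowest convention) and recursively expand the suffix.
-- Both Pythons are generators; the equivalence is about the list of yielded strings.

-- ===== PORT A =====
-- [idx for idx, char in enumerate(pattern) if char == "?"]  (enumerate carried as idx)
def pvPositionsAux (idx : Nat) : List Char → List Nat
  | [] => []
  | c :: rest => if c = '?' then idx :: pvPositionsAux (idx + 1) rest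
                 else pvPositionsAux (idx + 1) rest

-- itertools.product(tokens, repeat=n), leftmost position varying slowest
def pvProduct (tokens : List String) : Nat → List (List String)
  | 0 => [[]]
  | n + 1 => tokens.flatMap (fun t => (pvProduct tokens n).map (fun c => t :: c))

-- the inner loop over zip(positions, combo) with prev, parts joined by concatenation;
-- pattern[prev:pos] = (drop prev).take (pos - prev): Python-exact here since 0 ≤ prev ≤ pos ≤ len
def pvRender (s : List Char) : List (Nat × String) → Nat → List Char
  | [], prev => s.drop prev
  | (pos, rep) :: rest, prev =>
      ((s.drop prev).take (pos - prev)) ++ rep.toList ++ pvRender s rest (pos + 1)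

def expand_question_marks (pattern : String) (wildcard_tokens : List String) : List String :=
  let positions := pvPositionsAux 0 pattern.toList
  if positions = [] then [pattern]
  else (pvProduct wildcard_tokens positions.length).map
    (fun combo => String.ofList (pvRender pattern.toList (positions.zip combo) 0))

-- ===== PORT B =====
-- pattern.find("?"): none = -1; head/rest splitting and the two nested loops of Source B
def pvExpandCore (tokens : List String) (s : List Char) : List (List Char) :=
  match h : s.findIdx? (· = '?') with
  | none => [s]
  | some i =>
      tokens.flatMap (fun t =>
        (pvExpandCore tokens (s.drop (i + 1))).map (fun tail => s.take i ++ t.toList ++ tail))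
termination_by s.length
decreasing_by
  have hi : i < s.length := by
    have := List.findIdx?_eq_some_iff_findIdx_eq.mp h
    exact this.1
  simp [List.length_drop]; omega

def expand_question_marks_alt (pattern : String) (wildcard_tokens : List String) : List String :=
  (pvExpandCore wildcard_tokens pattern.toList).map String.ofList

-- ===== PRECONDITION & SPEC =====
def Spec_expand_question_marks (pattern : String) (wildcard_tokens : List String) (out : List String) : Prop := out = expand_question_marks_alt pattern wildcard_tokens
instance (pattern : String) (wildcard_tokens : List String) (out : List String) : Decidable (Spec_expand_question_marks pattern wildcard_tokens out) := by unfold Spec_expand_question_marks; infer_instance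

-- ===== CLAIM (what is proved, stated in full; the proofs are below) =====
def Claim_equal_expand_question_marks : Prop := ∀ (pattern : String) (wildcard_tokens : List String), Dom_expand_question_marks pattern wildcard_tokens → Spec_expand_question_marks pattern wildcard_tokens (expand_question_marks pattern wildcard_tokens)

-- ===== LEMMAS AND PROOFS =====

lemma pvPositionsAux_shift (s : List Char) (idx : Nat) :
    pvPositionsAux idx s = (pvPositionsAux 0 s).map (· + idx) := by
  induction s generalizing idx with
  | nil => simp [pvPositionsAux]
  | cons c rest ih =>
    by_cases hc : c = '?' <;>
      simp [pvPositionsAux, hc, ih (idx + 1), ih 1, List.map_map] <;>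
      · intro a _
        omega

lemma pvPositionsAux_append_no (h t : List Char) (idx : Nat) (hh : ∀ c ∈ h, c ≠ '?') :
    pvPositionsAux idx (h ++ t) = pvPositionsAux (idx + h.length) t := by
  induction h generalizing idx with
  | nil => simp
  | cons c rest ih =>
    have hc : c ≠ '?' := hh c (by simp)
    simp [pvPositionsAux, hc, ih (idx + 1) (fun c hc => hh c (by simp [hc]))]
    ring_nf

lemma pvPositionsAux_nil_of_no (s : List Char) (idx : Nat) (hh : ∀ c ∈ s, c ≠ '?') :
    pvPositionsAux idx s = [] := by
  have := pvPositionsAux_append_no s [] idx hh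
  simpa using this

lemma pvRender_shift (h r : List Char) (d : Char) (pc : List (Nat × String)) (prev : Nat) :
    pvRender (h ++ d :: r) (pc.map (fun q => (q.1 + (h.length + 1), q.2))) (prev + (h.length + 1))
      = pvRender r pc prev := by
  induction pc generalizing prev with
  | nil =>
    simp [pvRender]
    rw [show prev + (h.length + 1) = (h.length + 1) + prev by omega,
        ← List.drop_drop]
    congr 1
    simp
  | cons q rest ih =>
    obtain ⟨pos, rep⟩ := q
    simp only [pvRender, List.map_cons]
    have h1 : (h ++ d :: r).drop (prev + (h.length + 1)) = r.drop prev := by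
      rw [show prev + (h.length + 1) = (h.length + 1) + prev by omega, ← List.drop_drop]
      congr 1
      simp
    rw [h1, show pos + (h.length + 1) - (prev + (h.length + 1)) = pos - prev by omega,
        show pos + (h.length + 1) + 1 = (pos + 1) + (h.length + 1) by omega, ih (pos + 1)]

lemma pvExpandCore_eq_aux (tokens : List String) (n : Nat) :
    ∀ s : List Char, s.length = n →
      pvExpandCore tokens s =
        (pvProduct tokens (pvPositionsAux 0 s).length).map
          (fun combo => pvRender s ((pvPositionsAux 0 s).zip combo) 0) := by
  induction n using Nat.strong_induction_on with
  | _ n ih =>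
  intro s hn
  rw [pvExpandCore]
  cases h : s.findIdx? (· = '?') with
  | none =>
    have hno : ∀ c ∈ s, c ≠ '?' := by
      intro c hc hcq
      have h2 := List.findIdx?_eq_none_iff.mp h c hc
      simp [hcq] at h2
    rw [pvPositionsAux_nil_of_no s 0 hno]
    simp [pvProduct, pvRender]
  | some i =>
    have hfi := List.findIdx?_eq_some_iff_findIdx_eq.mp h
    have hi : i < s.length := hfi.1
    have hgi : s[i] = '?' := by
      have h3 := List.findIdx_getElem (p := (· = '?')) (xs := s) (w := hfi.2 ▸ hi)
      simp only [hfi.2] at h3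
      simpa using h3
    have hhead : ∀ c ∈ s.take i, c ≠ '?' := by
      intro c hc hcq
      obtain ⟨j, hj, hjc⟩ := List.mem_take_iff_getElem.mp hc
      have hji : j < i := by omega
      have h4 : decide ((s[j]'(by omega)) = '?') = false :=
        List.not_of_lt_findIdx (by rw [hfi.2]; exact hji)
      rw [hjc, hcq] at h4
      simp at h4
    have hlen_take : (s.take i).length = i := by simp [Nat.min_eq_left (le_of_lt hi)]
    obtain ⟨hd, hhd⟩ : ∃ hd, s.take i = hd := ⟨_, rfl⟩
    obtain ⟨r, hr⟩ : ∃ r, s.drop (i + 1) = r := ⟨_, rfl⟩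
    have hlen_hd : hd.length = i := by rw [← hhd]; exact hlen_take
    have hsplit : s = hd ++ '?' :: r := by
      conv_lhs => rw [← List.take_append_drop i s]
      rw [hhd, ← hr]
      congr 1
      rw [List.drop_eq_getElem_cons hi, hgi]
    have hpos : pvPositionsAux 0 s =
        i :: (pvPositionsAux 0 r).map (· + (i + 1)) := by
      conv_lhs => rw [hsplit]
      rw [pvPositionsAux_append_no _ _ 0 (hhd ▸ hhead), hlen_hd]
      simp only [pvPositionsAux]
      rw [pvPositionsAux_shift]
      simp
    have hrlen : r.length < n := by rw [← hr]; simp; omega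
    have hIH := ih _ hrlen r rfl
    have key : ∀ (t : String) (c : List String),
        pvRender s ((i :: (pvPositionsAux 0 r).map (· + (i + 1))).zip (t :: c)) 0
          = hd ++ t.toList ++ pvRender r ((pvPositionsAux 0 r).zip c) 0 := by
      intro t c
      simp only [List.zip_cons_cons, pvRender, Nat.sub_zero, List.drop_zero]
      rw [← hhd]
      congr 1
      have hz : ((pvPositionsAux 0 r).map (· + (i + 1))).zip c
          = ((pvPositionsAux 0 r).zip c).map (fun q => (q.1 + (i + 1), q.2)) := by
        rw [List.zip_map_left]
        rfl
      rw [hz]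
      conv_lhs => rw [hsplit]
      have h5 := pvRender_shift hd r '?' ((pvPositionsAux 0 r).zip c) 0
      rw [hlen_hd] at h5
      simpa using h5
    rw [hpos]
    simp only [List.length_cons, List.length_map, pvProduct, List.map_flatMap, List.map_map]
    congr 1
    funext t
    rw [hr, hIH, List.map_map]
    apply List.map_congr_left
    intro c _
    simpa [hhd] using (key t c).symm

lemma pvExpandCore_eq (tokens : List String) (s : List Char) :
    pvExpandCore tokens s =
      (pvProduct tokens (pvPositionsAux 0 s).length).map
        (fun combo => pvRender s ((pvPositionsAux 0 s).zip combo) 0) :=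
  pvExpandCore_eq_aux tokens s.length s rfl

-- ===== VERDICT (by name: the statement is the Claim_ definition above) =====
theorem expand_question_marks_spec : Claim_equal_expand_question_marks := by
  intro pattern wildcard_tokens _
  unfold Spec_expand_question_marks expand_question_marks expand_question_marks_alt
  rw [pvExpandCore_eq]
  by_cases hp : pvPositionsAux 0 pattern.toList = []
  · simp [hp, pvProduct, pvRender]
  · simp [hp, List.map_map, Function.comp]
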